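-- pv_equiv track=rewrite | github.com/igot-ai/os-twin | dashboard/knowledge/graph/parsers/markitdown_reader.py | _create_sliding_windows
-- ===== SOURCE A (Python) =====
-- from typing import Any, Dict, List, Optional
--
-- _SLIDING_WINDOW_SIZE = 3
--
-- _SLIDING_WINDOW_OVERLAP = 1
--
-- def _create_sliding_windows(
--     total_pages: int,
--     window_size: int = _SLIDING_WINDOW_SIZE,
--     overlap: int = _SLIDING_WINDOW_OVERLAP,
-- ) -> List[tuple]:
--     """Create sliding windows over a range of page indices.
--
--     Ported from ``FileExtraction._create_sliding_windows`` (file_extraction.py)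
--     to provide the same page-window semantics for text-based documents.
--
--     Parameters
--     ----------
--     total_pages:
--         Total number of pages (or page-sized segments) in the document.
--     window_size:
--         Number of pages to include in each window.
--     overlap:
--         Number of pages to share between consecutive windows.
--
--     Returns
--     -------
--     List of ``(window_start, [page_indices])`` tuples, sorted by window_start.
--
--     Raises
--     ------
--     ValueError
--         If ``window_size < 1``, ``overlap < 0`` or ``overlap >= window_size``.
--     """
--     if window_size < 1:
--         raise ValueError("window_size must be at least 1")
--     if overlap < 0:
--         raise ValueError("overlap must be non-negative")
--     if overlap >= window_size:
--         raise ValueError("overlap must be less than window_size")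
--
--     windows: List[tuple] = []
--     step_size = window_size - overlap
--
--     if total_pages <= window_size:
--         windows.append((0, list(range(0, total_pages))))
--     else:
--         i = 0
--         while i < total_pages:
--             window_end = min(i + window_size, total_pages)
--             window_pages = list(range(i, window_end))
--             windows.append((i, window_pages))
--             if window_end == total_pages:
--                 break
--             i += step_size
--             if i + window_size > total_pages and i < total_pages:
--                 final_start = max(i, total_pages - window_size)
--                 existing_starts = {start for start, _ in windows}
--                 if final_start not in existing_starts:
--                     windows.append((final_start, list(range(final_start, total_pages))))
--                 break
--
--     return windows
-- ===== SOURCE B (Python) =====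
-- def _create_sliding_windows(total_pages, window_size=3, overlap=1):
--     if window_size < 1:
--         raise ValueError("window_size must be at least 1")
--     if overlap < 0:
--         raise ValueError("overlap must be non-negative")
--     if overlap >= window_size:
--         raise ValueError("overlap must be less than window_size")
--
--     if total_pages <= window_size:
--         return [(0, list(range(0, total_pages)))]
--
--     step = window_size - overlap
--     # closed-form count: smallest k with k*step + window_size >= total_pages
--     num_steps = (total_pages - window_size + step - 1) // step
--     return [
--         (j * step, list(range(j * step, min(j * step + window_size, total_pages))))
--         for j in range(num_steps + 1)
--     ]
-- ===== Notes on version B (the rewrite author's own statement) =====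
-- stated objective: alternative
-- what changed: Replaces A's stateful while-loop (embedded final-window branch, max() and existing-starts set) with a closed form: a ceiling division computes the number of windows, and one comprehension over range(num_steps+1) emits each window arithmetically from its index.
import Mathlib
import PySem

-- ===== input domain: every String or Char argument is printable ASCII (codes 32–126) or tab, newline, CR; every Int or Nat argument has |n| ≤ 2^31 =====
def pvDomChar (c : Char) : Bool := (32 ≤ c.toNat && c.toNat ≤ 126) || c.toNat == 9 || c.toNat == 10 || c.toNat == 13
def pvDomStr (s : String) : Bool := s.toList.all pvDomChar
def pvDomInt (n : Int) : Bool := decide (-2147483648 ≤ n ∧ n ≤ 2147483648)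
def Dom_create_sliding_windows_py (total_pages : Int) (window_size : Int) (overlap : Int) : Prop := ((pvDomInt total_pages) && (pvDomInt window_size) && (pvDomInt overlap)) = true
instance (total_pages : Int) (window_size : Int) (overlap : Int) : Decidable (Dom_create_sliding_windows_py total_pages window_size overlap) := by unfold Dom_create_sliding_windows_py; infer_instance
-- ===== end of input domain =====

-- B replaces A's while-loop (with embedded final-window branch, max() and existing-starts set)
-- by a closed form: ceiling division computes the number of windows, one comprehension emits them.


-- ===== PORT A =====
-- A's while-loop: state (i, windows); the `0 < step` guard only makes the recursion total
-- (under A's guards step = window_size - overlap ≥ 1, so it never changes the computed value on Pre_).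
-- The set comprehension {start for start, _ in windows} + membership is ported as list membership
-- on the starts (same truth value).
def pyALoop (total window step : Int) (i : Int) (acc : List (Int × List Int)) : List (Int × List Int) :=
  if _h : i < total ∧ 0 < step then
    let wend := min (i + window) total
    let acc' := acc ++ [(i, PySem.List.pyRange i wend 1)]
    if wend = total then acc'
    else
      let i' := i + step
      if i' + window > total ∧ i' < total then
        let final_start := max i' (total - window)
        if (acc'.map Prod.fst).contains final_start then acc'
        else acc' ++ [(final_start, PySem.List.pyRange final_start total 1)]
      else pyALoop total window step i' acc'
  else acc
termination_by (total - i).toNat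
decreasing_by omega

def create_sliding_windows_py (total_pages : Int) (window_size : Int) (overlap : Int) : List (Int × List Int) :=
  -- the three ValueError guards: Python raises there; Pre_ excludes them, the port returns []
  if window_size < 1 then []
  else if overlap < 0 then []
  else if overlap ≥ window_size then []
  else
    let step_size := window_size - overlap
    if total_pages ≤ window_size then [(0, PySem.List.pyRange 0 total_pages 1)]
    else pyALoop total_pages window_size step_size 0 []

-- ===== PORT B =====
def create_sliding_windows_py_alt (total_pages : Int) (window_size : Int) (overlap : Int) : List (Int × List Int) :=
  if window_size < 1 then []
  else if overlap < 0 then []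
  else if overlap ≥ window_size then []
  else if total_pages ≤ window_size then [(0, PySem.List.pyRange 0 total_pages 1)]
  else
    let step := window_size - overlap
    -- closed-form count: smallest k with k*step + window_size ≥ total_pages (ceiling division)
    let num_steps := PySem.Int.floordiv (total_pages - window_size + step - 1) step
    (PySem.List.pyRange 0 (num_steps + 1) 1).map
      (fun j => (j * step, PySem.List.pyRange (j * step) (min (j * step + window_size) total_pages) 1))

-- ===== PRECONDITION & SPEC =====
-- Pre_ excludes exactly the inputs on which Python A raises ValueError (its three explicit guards).
def Pre_create_sliding_windows_py (total_pages : Int) (window_size : Int) (overlap : Int) : Prop :=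
  1 ≤ window_size ∧ 0 ≤ overlap ∧ overlap < window_size
instance (total_pages : Int) (window_size : Int) (overlap : Int) : Decidable (Pre_create_sliding_windows_py total_pages window_size overlap) := by unfold Pre_create_sliding_windows_py; infer_instance

def pvWitness_create_sliding_windows_py : Int × Int × Int := (10, 3, 1)

def Spec_create_sliding_windows_py (total_pages : Int) (window_size : Int) (overlap : Int) (out : List (Int × List Int)) : Prop := out = create_sliding_windows_py_alt total_pages window_size overlap
instance (total_pages : Int) (window_size : Int) (overlap : Int) (out : List (Int × List Int)) : Decidable (Spec_create_sliding_windows_py total_pages window_size overlap out) := by unfold Spec_create_sliding_windows_py; infer_instance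

-- ===== CLAIM (what is proved, stated in full; the proofs are below) =====
def Claim_equal_create_sliding_windows_py : Prop := ∀ (total_pages : Int) (window_size : Int) (overlap : Int), Dom_create_sliding_windows_py total_pages window_size overlap → Pre_create_sliding_windows_py total_pages window_size overlap → Spec_create_sliding_windows_py total_pages window_size overlap (create_sliding_windows_py total_pages window_size overlap)

-- ===== LEMMAS AND PROOFS =====

-- Proof-side helper: the list of window starts as A's loop visits them.
def pyStarts (total window step : Int) (s : Int) : List Int :=
  if s + window ≥ total then [s]
  else if _h : 0 < step ∧ 0 < window then s :: pyStarts total window step (s + step)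
  else [s]
termination_by (total - s).toNat
decreasing_by omega

-- A's while-loop at state (i, acc) produces acc ++ the windows of the remaining starts,
-- provided all starts already in acc are < i.
theorem pyALoop_eq (total window step : Int) (hw : 1 ≤ window) (hs : 0 < step)
    (hsw : step ≤ window) :
    ∀ (n : ℕ) (i : Int) (acc : List (Int × List Int)), (total - i).toNat ≤ n → i < total →
    (∀ x ∈ acc.map Prod.fst, x < i) →
    pyALoop total window step i acc =
      acc ++ (pyStarts total window step i).map
        (fun s => (s, PySem.List.pyRange s (min (s + window) total) 1)) := by
  intro n
  induction n with
  | zero => intro i acc hn hi _; omega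
  | succ n ih =>
    intro i acc hn hi hacc
    rw [pyALoop, dif_pos (⟨hi, hs⟩ : i < total ∧ 0 < step)]
    by_cases hge : i + window ≥ total
    · have hmin : min (i + window) total = total := by omega
      rw [pyStarts, if_pos hge]
      simp [hmin]
    · have hmin : min (i + window) total = i + window := by omega
      rw [pyStarts, if_neg hge, dif_pos (⟨hs, by omega⟩ : 0 < step ∧ 0 < window)]
      simp only [hmin, if_neg (by omega : ¬ i + window = total)]
      by_cases hfin : total < i + step + window
      · rw [if_pos (⟨by omega, by omega⟩ : i + step + window > total ∧ i + step < total)]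
        have hmax : max (i + step) (total - window) = i + step := by omega
        have hnotmem : ¬ ((acc ++ [(i, PySem.List.pyRange i (i + window) 1)]).map
            Prod.fst).contains (max (i + step) (total - window)) = true := by
          simp only [List.contains_eq_mem, List.map_append, List.mem_append, List.mem_map,
            decide_eq_true_eq, hmax]
          rintro (⟨p, hp, hfst⟩ | h)
          · have := hacc p.1 (List.mem_map_of_mem hp); omega
          · simp at h; omega
        rw [if_neg hnotmem]
        rw [pyStarts, if_pos (by omega : i + step + window ≥ total)]
        have hmin2 : min (i + step + window) total = total := by omega
        simp [hmax, hmin2, hmin]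
      · rw [if_neg (by omega : ¬ (i + step + window > total ∧ i + step < total))]
        rw [ih (i + step) (acc ++ [(i, PySem.List.pyRange i (i + window) 1)])
          (by omega) (by omega)
          (by intro x hx
              simp only [List.map_append, List.mem_append] at hx
              rcases hx with hx | hx
              · have := hacc x hx; omega
              · simp at hx; omega)]
        simp [hmin]

-- The recursive starts list equals the arithmetic sequence [j*step for j in range(j0, k+1)],
-- where k is the smallest index with k*step + window ≥ total.
theorem pyStarts_eq_range (total window step k : Int) (hs : 0 < step) (hw : 0 < window)
    (hk1 : total ≤ k * step + window) (hk2 : ∀ j : Int, j < k → j * step + window < total) :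
    ∀ (n : ℕ) (j : Int), (k - j).toNat ≤ n → j ≤ k →
    pyStarts total window step (j * step) = (PySem.List.pyRange j (k + 1) 1).map (· * step) := by
  intro n
  induction n with
  | zero =>
    intro j hn hj
    have hjk : j = k := by omega
    subst hjk
    rw [pyStarts, if_pos (by omega : j * step + window ≥ total)]
    rw [PySem.List.pyRange_one_cons (by omega : j < j + 1)]
    have : PySem.List.pyRange (j + 1) (j + 1) 1 = [] := by
      simp
    simp [this]
  | succ n ih =>
    intro j hn hj
    by_cases hjk : j = k
    · subst hjk
      rw [pyStarts, if_pos (by omega : j * step + window ≥ total)]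
      rw [PySem.List.pyRange_one_cons (by omega : j < j + 1)]
      have : PySem.List.pyRange (j + 1) (j + 1) 1 = [] := by
        simp
      simp [this]
    · have hlt : j < k := by omega
      have hless := hk2 j hlt
      rw [pyStarts, if_neg (by omega : ¬ j * step + window ≥ total),
        dif_pos (⟨hs, hw⟩ : 0 < step ∧ 0 < window)]
      rw [PySem.List.pyRange_one_cons (by omega : j < k + 1)]
      have hstep : j * step + step = (j + 1) * step := by ring
      rw [hstep, ih (j + 1) (by omega) (by omega)]
      simp

-- ===== VERDICT (by name: the statement is the Claim_ definition above) =====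
theorem create_sliding_windows_py_spec : Claim_equal_create_sliding_windows_py := by
  intro total window overlap _hdom ⟨hw, ho1, ho2⟩
  unfold Spec_create_sliding_windows_py create_sliding_windows_py create_sliding_windows_py_alt
  simp only [if_neg (by omega : ¬ window < 1), if_neg (by omega : ¬ overlap < 0),
    if_neg (by omega : ¬ overlap ≥ window)]
  by_cases htw : total ≤ window
  · simp [htw]
  · rw [if_neg htw, if_neg htw]
    set step := window - overlap with hstepdef
    have hs : 0 < step := by omega
    set k := PySem.Int.floordiv (total - window + step - 1) step with hkdef
    have hk := (PySem.Int.floordiv_eq_iff_of_pos hs).mp hkdef.symm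
    -- hk : k * step ≤ total - window + step - 1 ∧ total - window + step - 1 < (k+1) * step
    have hk1 : total ≤ k * step + window := by nlinarith [hk.2]
    have hk2 : ∀ j : Int, j < k → j * step + window < total := by
      intro j hj
      have hmul : j * step ≤ (k - 1) * step :=
        mul_le_mul_of_nonneg_right (by omega) (le_of_lt hs)
      nlinarith [hk.1]
    rw [pyALoop_eq total window step hw hs (by omega)
      (total - 0).toNat 0 [] (by omega) (by omega) (by simp)]
    have h0 : (0 : Int) = 0 * step := by ring
    rw [List.nil_append, h0,
      pyStarts_eq_range total window step k hs (by omega) hk1 hk2 k.toNat 0 (by omega)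
        (by nlinarith [hk.1])]
    simp [List.map_map, Function.comp]
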